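-- pv_equiv track=rewrite | github.com/alvinchan2020/codeforces | 1607/E/main.py | solve
-- ===== SOURCE A (Python) =====
-- def solve(r, c, s):
--     pos = [1, 1]
--     pos_range = {"U": 1, "D": 1, "L": 1, "R": 1}
--     for command in s:
--         # execute command
--         if command == "R":
--             pos[1] += 1
--             pos_range["R"] = max(pos_range["R"], pos[1])
--         elif command == "L":
--             pos[1] -= 1
--             pos_range["L"] = min(pos_range["L"], pos[1])
--         elif command == "U":
--             pos[0] -= 1
--             pos_range["U"] = min(pos_range["U"], pos[0])
--         elif command == "D":
--             pos[0] += 1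
--             pos_range["D"] = max(pos_range["D"], pos[0])
--         else:
--             raise NotImplementedError()
--
--         # check range
--         if (pos_range["D"] - pos_range["U"] + 1 > r) or (pos_range["R"] - pos_range["L"] + 1 > c):
--             # roll back
--             if command == "R":
--                 pos[1] -= 1
--                 pos_range["R"] -= 1
--             elif command == "L":
--                 pos[1] += 1
--                 pos_range["L"] += 1
--             elif command == "U":
--                 pos[0] += 1
--                 pos_range["U"] += 1
--             elif command == "D":
--                 pos[0] -= 1
--                 pos_range["D"] -= 1
--             else:
--                 raise NotImplementedError()
--
--             break
--
--     # calc starting point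
--     starting_pos = [2-pos_range["U"], 2-pos_range["L"]]
--     return starting_pos
-- ===== SOURCE B (Python) =====
-- def solve(r, c, s):
--     DELTA = {"U": (-1, 0), "D": (1, 0), "L": (0, -1), "R": (0, 1)}
--     # Pass 1: the whole unconstrained walk, as prefix positions starting at (1, 1).
--     xs, ys = [1], [1]
--     for ch in s:
--         dx, dy = DELTA[ch]
--         xs.append(xs[-1] + dx)
--         ys.append(ys[-1] + dy)
--
--     # Pass 2: running extrema of each coordinate along the walk.
--     def running(op, vals):
--         out = [vals[0]]
--         for v in vals[1:]:
--             out.append(op(out[-1], v))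
--         return out
--
--     minx, maxx = running(min, xs), running(max, xs)
--     miny, maxy = running(min, ys), running(max, ys)
--
--     def fits(k):
--         return maxx[k] - minx[k] + 1 <= r and maxy[k] - miny[k] + 1 <= c
--
--     # The bounding box only grows along the walk, so fits is monotone in k:
--     # binary-search the last prefix that still fits (index 0 if none does).
--     lo, hi = 0, len(xs) - 1
--     while lo < hi:
--         mid = (lo + hi + 1) // 2
--         if fits(mid):
--             lo = mid
--         else:
--             hi = mid - 1
--     return [2 - minx[lo], 2 - miny[lo]]
-- ===== Notes on version B (the rewrite author's own statement) =====
-- stated objective: alternative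
-- what changed: B replaces A's online simulate-check-rollback loop by an offline pipeline: it first materialises the whole unconstrained walk as prefix-position lists, then builds running-extrema lists for both axes, and finally BINARY-SEARCHES (exploiting that the bounding box only grows along the walk, so feasibility is monotone) for the last prefix whose box fits the grid, reading the answer off the precomputed minima lists.
-- outside the precondition, e.g. on solve(0, 5, 'DX'): A returns [1, 1], B raises KeyError
import Mathlib
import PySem

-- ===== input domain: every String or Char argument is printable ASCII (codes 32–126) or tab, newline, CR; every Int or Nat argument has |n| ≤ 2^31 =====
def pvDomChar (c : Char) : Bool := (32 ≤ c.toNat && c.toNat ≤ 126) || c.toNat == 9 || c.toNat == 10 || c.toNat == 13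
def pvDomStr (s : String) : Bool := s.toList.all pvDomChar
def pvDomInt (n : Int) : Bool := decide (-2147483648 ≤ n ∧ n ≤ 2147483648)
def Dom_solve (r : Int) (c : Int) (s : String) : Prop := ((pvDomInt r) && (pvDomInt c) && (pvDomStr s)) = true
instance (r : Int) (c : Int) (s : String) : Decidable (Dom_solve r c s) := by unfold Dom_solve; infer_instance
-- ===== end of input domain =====

-- B trades A's online execute/check/rollback simulation for staged passes (full walk list, running-extrema lists) plus a binary search for the last fitting prefix (alternative algorithm, same cost); strings with a non-UDLR character are outside Pre_solve (A raises NotImplementedError when it reaches one, B raises KeyError on any such string).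


-- ===== PORT A =====
-- Python's mutable list pos = [row, col] is carried as the pair (row, col); pos_range is the PySem.Dict.
-- Where Python raises NotImplementedError (non-UDLR command; excluded by Pre_solve) the port stops with the current state.
def solveLoop (r c : Int) : List Char → (Int × Int) → PySem.Dict String Int → (Int × Int) × PySem.Dict String Int
  | [], pos, pr => (pos, pr)
  | ch :: rest, pos, pr =>
    let st : Option ((Int × Int) × PySem.Dict String Int) :=
      if ch = 'R' then some ((pos.1, pos.2 + 1), pr.insert "R" (max (pr.getD "R" 0) (pos.2 + 1)))
      else if ch = 'L' then some ((pos.1, pos.2 - 1), pr.insert "L" (min (pr.getD "L" 0) (pos.2 - 1)))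
      else if ch = 'U' then some ((pos.1 - 1, pos.2), pr.insert "U" (min (pr.getD "U" 0) (pos.1 - 1)))
      else if ch = 'D' then some ((pos.1 + 1, pos.2), pr.insert "D" (max (pr.getD "D" 0) (pos.1 + 1)))
      else none
    match st with
    | none => (pos, pr)
    | some (pos', pr') =>
      if pr'.getD "D" 0 - pr'.getD "U" 0 + 1 > r ∨ pr'.getD "R" 0 - pr'.getD "L" 0 + 1 > c then
        -- roll back, then break
        if ch = 'R' then ((pos'.1, pos'.2 - 1), pr'.insert "R" (pr'.getD "R" 0 - 1))
        else if ch = 'L' then ((pos'.1, pos'.2 + 1), pr'.insert "L" (pr'.getD "L" 0 + 1))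
        else if ch = 'U' then ((pos'.1 + 1, pos'.2), pr'.insert "U" (pr'.getD "U" 0 + 1))
        else ((pos'.1 - 1, pos'.2), pr'.insert "D" (pr'.getD "D" 0 - 1))
      else solveLoop r c rest pos' pr'

def solve (r : Int) (c : Int) (s : String) : List Int :=
  let res := solveLoop r c s.toList (1, 1)
      (PySem.Dict.ofList [("U", 1), ("D", 1), ("L", 1), ("R", 1)])
  [2 - res.2.getD "U" 0, 2 - res.2.getD "L" 0]

-- ===== PORT B =====
def bDelta : PySem.Dict Char (Int × Int) :=
  PySem.Dict.ofList [('U', (-1, 0)), ('D', (1, 0)), ('L', (0, -1)), ('R', (0, 1))]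

-- Pass 1: xs, ys are built by appending in Python; here the same lists are produced front-first.
-- Where Python raises KeyError (non-UDLR char; excluded by Pre_solve) the port stops building.
def bWalk : List Char → Int → Int → List Int × List Int
  | [], _, _ => ([], [])
  | ch :: t, x, y =>
    match bDelta.get? ch with
    | none => ([], [])
    | some (dx, dy) =>
      let p := bWalk t (x + dx) (y + dy)
      ((x + dx) :: p.1, (y + dy) :: p.2)

-- Pass 2: Python's running(op, vals): out[i] = op(out[i-1], vals[i]), the same left-to-right recurrence.
def bRunTail (op : Int → Int → Int) : Int → List Int → List Int
  | _, [] => []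
  | a, v :: t => op a v :: bRunTail op (op a v) t

def bRunning (op : Int → Int → Int) : List Int → List Int
  | [] => []
  | h :: t => h :: bRunTail op h t

-- fits(k): k is always a nonnegative in-range index in Python, so Nat indexing with getD is exact.
def bFits (r c : Int) (minx maxx miny maxy : List Int) (k : Nat) : Bool :=
  decide (maxx.getD k 0 - minx.getD k 0 + 1 ≤ r) && decide (maxy.getD k 0 - miny.getD k 0 + 1 ≤ c)

-- the while-loop binary search; lo, hi stay nonnegative in Python and (lo+hi+1)//2 = Nat division here.
def bSearch (fits : Nat → Bool) (lo hi : Nat) : Nat :=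
  if lo < hi then
    let mid := (lo + hi + 1) / 2
    if fits mid then bSearch fits mid hi else bSearch fits lo (mid - 1)
  else lo
termination_by hi - lo
decreasing_by all_goals omega

def solve_alt (r : Int) (c : Int) (s : String) : List Int :=
  let w := bWalk s.toList 1 1
  let xs := 1 :: w.1
  let ys := 1 :: w.2
  let minx := bRunning min xs
  let maxx := bRunning max xs
  let miny := bRunning min ys
  let maxy := bRunning max ys
  let k := bSearch (bFits r c minx maxx miny maxy) 0 (xs.length - 1)
  [2 - minx.getD k 0, 2 - miny.getD k 0]

-- ===== PRECONDITION & SPEC =====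
-- Pre_solve excludes strings containing a non-UDLR character: B raises KeyError on any such string, and A
-- raises NotImplementedError when its loop reaches the bad character; when A's loop breaks before reaching
-- it A still returns — those inputs are also excluded (see cites).
def Pre_solve (r : Int) (c : Int) (s : String) : Prop :=
  (s.toList.all fun ch => ch == 'U' || ch == 'D' || ch == 'L' || ch == 'R') = true
instance (r : Int) (c : Int) (s : String) : Decidable (Pre_solve r c s) := by unfold Pre_solve; infer_instance

def pvWitness_solve : Int × Int × String := (2, 3, "RRDLLU")

def Spec_solve (r : Int) (c : Int) (s : String) (out : List Int) : Prop := out = solve_alt r c s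
instance (r : Int) (c : Int) (s : String) (out : List Int) : Decidable (Spec_solve r c s out) := by unfold Spec_solve; infer_instance

-- ===== CLAIM (what is proved, stated in full; the proofs are below) =====
def Claim_equal_solve : Prop := ∀ (r : Int) (c : Int) (s : String), Dom_solve r c s → Pre_solve r c s → Spec_solve r c s (solve r c s)

-- ===== LEMMAS AND PROOFS =====

-- total step function used by the proof-side spec loop (junk chars never occur inside Pre_solve)
def stepOf (ch : Char) : Int × Int :=
  if ch = 'U' then (-1, 0) else if ch = 'D' then (1, 0)
  else if ch = 'L' then (0, -1) else if ch = 'R' then (0, 1) else (0, 0)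

-- proof-side reference loop: predictive one-pass simulation carrying position and extrema as scalars
def specLoop (r c : Int) : List Char → Int → Int → Int → Int → Int → Int → Int × Int
  | [], _, _, lox, _, loy, _ => (lox, loy)
  | ch :: rest, x, y, lox, hix, loy, hiy =>
    let d := stepOf ch
    let x2 := x + d.1
    let y2 := y + d.2
    if max hix x2 - min lox x2 + 1 > r ∨ max hiy y2 - min loy y2 + 1 > c then (lox, loy)
    else specLoop r c rest x2 y2 (min lox x2) (max hix x2) (min loy y2) (max hiy y2)

-- proof-side forward linear search: the index at which A's loop stops
def kStar (F : Nat → Bool) (k hi : Nat) : Nat :=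
  if k < hi then (if F (k + 1) then kStar F (k + 1) hi else k) else k
termination_by hi - k
decreasing_by omega

@[simp] theorem stepOf_U : stepOf 'U' = (-1, 0) := rfl
@[simp] theorem stepOf_D : stepOf 'D' = (1, 0) := rfl
@[simp] theorem stepOf_L : stepOf 'L' = (0, -1) := rfl
@[simp] theorem stepOf_R : stepOf 'R' = (0, 1) := rfl
@[simp] theorem bDelta_U : bDelta.get? 'U' = some (-1, 0) := rfl
@[simp] theorem bDelta_D : bDelta.get? 'D' = some (1, 0) := rfl
@[simp] theorem bDelta_L : bDelta.get? 'L' = some (0, -1) := rfl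
@[simp] theorem bDelta_R : bDelta.get? 'R' = some (0, 1) := rfl

-- Canonical shape of A's pos_range dict: the four entries in insertion order, with variable values.
def mkPR (u d l rr : Int) : PySem.Dict String Int :=
  PySem.Dict.ofList [("U", u), ("D", d), ("L", l), ("R", rr)]

@[simp] theorem mkPR_getD_U (u d l rr : Int) : (mkPR u d l rr).getD "U" 0 = u := rfl
@[simp] theorem mkPR_getD_D (u d l rr : Int) : (mkPR u d l rr).getD "D" 0 = d := rfl
@[simp] theorem mkPR_getD_L (u d l rr : Int) : (mkPR u d l rr).getD "L" 0 = l := rfl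
@[simp] theorem mkPR_getD_R (u d l rr : Int) : (mkPR u d l rr).getD "R" 0 = rr := rfl
@[simp] theorem mkPR_ins_U (u d l rr v : Int) : (mkPR u d l rr).insert "U" v = mkPR v d l rr := rfl
@[simp] theorem mkPR_ins_D (u d l rr v : Int) : (mkPR u d l rr).insert "D" v = mkPR u v l rr := rfl
@[simp] theorem mkPR_ins_L (u d l rr v : Int) : (mkPR u d l rr).insert "L" v = mkPR u d v rr := rfl
@[simp] theorem mkPR_ins_R (u d l rr v : Int) : (mkPR u d l rr).insert "R" v = mkPR u d l v := rfl

-- A's loop equals the proof-side predictive loop (invariant: extremes bound the position; if the box is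
-- already too big — degenerate grid at the start — position equals all extremes, so rollback is exact).
theorem solveLoop_eq (r c : Int) (cs : List Char) :
    ∀ (x y lox hix loy hiy : Int),
      (∀ ch ∈ cs, ch = 'U' ∨ ch = 'D' ∨ ch = 'L' ∨ ch = 'R') →
      lox ≤ x → x ≤ hix → loy ≤ y → y ≤ hiy →
      ((hix - lox + 1 > r ∨ hiy - loy + 1 > c) → (lox = x ∧ hix = x ∧ loy = y ∧ hiy = y)) →
      ((solveLoop r c cs (x, y) (mkPR lox hix loy hiy)).2.getD "U" 0
          = (specLoop r c cs x y lox hix loy hiy).1 ∧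
       (solveLoop r c cs (x, y) (mkPR lox hix loy hiy)).2.getD "L" 0
          = (specLoop r c cs x y lox hix loy hiy).2) := by
  induction cs with
  | nil => intro x y lox hix loy hiy _ _ _ _ _ _; simp [solveLoop, specLoop]
  | cons ch rest ih =>
    intro x y lox hix loy hiy hcs hlx hxh hly hyh hv
    have hch := hcs ch (List.mem_cons_self ..)
    have hrest : ∀ c' ∈ rest, c' = 'U' ∨ c' = 'D' ∨ c' = 'L' ∨ c' = 'R' :=
      fun c' hc' => hcs c' (List.mem_cons_of_mem _ hc')
    rcases hch with h | h | h | h <;> subst h <;>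
      simp [solveLoop, specLoop, ← sub_eq_add_neg]
    · -- 'U'
      rw [show max hix (x - 1) = hix from by omega, show min loy y = loy from by omega,
        show max hiy y = hiy from by omega]
      split_ifs with hb
      · have key : min lox (x - 1) + 1 = lox := by
          rcases Decidable.em (hix - lox + 1 > r ∨ hiy - loy + 1 > c) with hov | hov
          · obtain ⟨e1, e2, e3, e4⟩ := hv hov; omega
          · omega
        simp [key]
      · exact ih (x - 1) y (min lox (x - 1)) hix loy hiy hrest (by omega) (by omega) hly hyh
          (fun hcon => absurd (show r ≤ hix - min lox (x - 1) ∨ c ≤ hiy - loy from by omega) hb)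
    · -- 'D'
      rw [show min lox (x + 1) = lox from by omega, show min loy y = loy from by omega,
        show max hiy y = hiy from by omega]
      split_ifs with hb
      · simp
      · exact ih (x + 1) y lox (max hix (x + 1)) loy hiy hrest (by omega) (by omega) hly hyh
          (fun hcon => absurd (show r ≤ max hix (x + 1) - lox ∨ c ≤ hiy - loy from by omega) hb)
    · -- 'L'
      rw [show min lox x = lox from by omega, show max hix x = hix from by omega,
        show max hiy (y - 1) = hiy from by omega]
      split_ifs with hb
      · have key : min loy (y - 1) + 1 = loy := by
          rcases Decidable.em (hix - lox + 1 > r ∨ hiy - loy + 1 > c) with hov | hov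
          · obtain ⟨e1, e2, e3, e4⟩ := hv hov; omega
          · omega
        simp [key]
      · exact ih x (y - 1) lox hix (min loy (y - 1)) hiy hrest hlx hxh (by omega) (by omega)
          (fun hcon => absurd (show r ≤ hix - lox ∨ c ≤ hiy - min loy (y - 1) from by omega) hb)
    · -- 'R'
      rw [show min lox x = lox from by omega, show max hix x = hix from by omega,
        show min loy (y + 1) = loy from by omega]
      split_ifs with hb
      · simp
      · exact ih x (y + 1) lox hix loy (max hiy (y + 1)) hrest hlx hxh (by omega) (by omega)
          (fun hcon => absurd (show r ≤ hix - lox ∨ c ≤ max hiy (y + 1) - loy from by omega) hb)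

-- lengths of the walk lists
theorem bWalk_len (cs : List Char) : ∀ x y : Int,
    (∀ ch ∈ cs, ch = 'U' ∨ ch = 'D' ∨ ch = 'L' ∨ ch = 'R') →
    (bWalk cs x y).1.length = cs.length ∧ (bWalk cs x y).2.length = cs.length := by
  induction cs with
  | nil => intro x y _; simp [bWalk]
  | cons ch t ih =>
    intro x y hok
    have hch := hok ch (List.mem_cons_self ..)
    have hok' : ∀ c' ∈ t, c' = 'U' ∨ c' = 'D' ∨ c' = 'L' ∨ c' = 'R' :=
      fun c' hc' => hok c' (List.mem_cons_of_mem _ hc')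
    rcases hch with h | h | h | h <;> subst h
    · simpa [bWalk] using ih (x + -1) (y + 0) hok'
    · simpa [bWalk] using ih (x + 1) (y + 0) hok'
    · simpa [bWalk] using ih (x + 0) (y + -1) hok'
    · simpa [bWalk] using ih (x + 0) (y + 1) hok'

-- step recurrence for the walk lists
theorem bWalk_getD (cs : List Char) : ∀ (k : Nat) (x y : Int) (ch : Char) (t : List Char),
    (∀ ch' ∈ cs, ch' = 'U' ∨ ch' = 'D' ∨ ch' = 'L' ∨ ch' = 'R') →
    cs.drop k = ch :: t →
    (x :: (bWalk cs x y).1).getD (k + 1) 0 = (x :: (bWalk cs x y).1).getD k 0 + (stepOf ch).1 ∧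
    (y :: (bWalk cs x y).2).getD (k + 1) 0 = (y :: (bWalk cs x y).2).getD k 0 + (stepOf ch).2 := by
  induction cs with
  | nil => intro k x y ch t _ hd; simp at hd
  | cons c0 cs' ih =>
    intro k x y ch t hok hd
    have hc0 := hok c0 (List.mem_cons_self ..)
    have hok' : ∀ ch' ∈ cs', ch' = 'U' ∨ ch' = 'D' ∨ ch' = 'L' ∨ ch' = 'R' :=
      fun c' hc' => hok c' (List.mem_cons_of_mem _ hc')
    cases k with
    | zero =>
      simp at hd
      obtain ⟨rfl, rfl⟩ := hd
      rcases hc0 with h | h | h | h <;> subst h <;> simp [bWalk]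
    | succ k =>
      have hd' : cs'.drop k = ch :: t := by simpa using hd
      have := ih k (x + (stepOf c0).1) (y + (stepOf c0).2) ch t hok' hd'
      rcases hc0 with h | h | h | h <;> subst h <;>
        simpa [bWalk, List.getD_cons_succ] using this

-- recurrence for the running-extrema lists
theorem bRunTail_getD (op : Int → Int → Int) :
    ∀ (t : List Int) (a : Int) (k : Nat), k + 1 < t.length →
      (bRunTail op a t).getD (k + 1) 0 = op ((bRunTail op a t).getD k 0) (t.getD (k + 1) 0) := by
  intro t
  induction t with
  | nil => intro a k h; simp at h
  | cons v t' ih =>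
    intro a k h
    cases k with
    | zero =>
      cases t' with
      | nil => simp at h
      | cons w t'' => simp [bRunTail]
    | succ k =>
      have h' : k + 1 < t'.length := by simpa using h
      simpa [bRunTail, List.getD_cons_succ] using ih (op a v) k h'

theorem bRunning_getD (op : Int → Int → Int) (l : List Int) (k : Nat) (h : k + 1 < l.length) :
    (bRunning op l).getD (k + 1) 0 = op ((bRunning op l).getD k 0) (l.getD (k + 1) 0) := by
  cases l with
  | nil => simp at h
  | cons h0 t =>
    cases k with
    | zero =>
      cases t with
      | nil => simp at h
      | cons w t' => simp [bRunning, bRunTail]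
    | succ k =>
      have h' : k + 1 < t.length := by simpa using h
      simpa [bRunning, List.getD_cons_succ] using bRunTail_getD op t h0 k h'

-- the staged pipeline equals the predictive loop, via the index recurrences
theorem bridge (r c : Int) (cs : List Char) (f g mnx mxx mny mxy : Nat → Int) (F : Nat → Bool)
    (HF : ∀ j, F j = (decide (mxx j - mnx j + 1 ≤ r) && decide (mxy j - mny j + 1 ≤ c)))
    (Hstep : ∀ (k : Nat) (ch : Char) (t : List Char), cs.drop k = ch :: t →
      f (k + 1) = f k + (stepOf ch).1 ∧ g (k + 1) = g k + (stepOf ch).2)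
    (Hmin : ∀ k : Nat, k + 1 ≤ cs.length →
      mnx (k + 1) = min (mnx k) (f (k + 1)) ∧ mxx (k + 1) = max (mxx k) (f (k + 1)) ∧
      mny (k + 1) = min (mny k) (g (k + 1)) ∧ mxy (k + 1) = max (mxy k) (g (k + 1))) :
    ∀ (t : List Char) (k : Nat), cs.drop k = t →
      specLoop r c t (f k) (g k) (mnx k) (mxx k) (mny k) (mxy k)
        = (mnx (kStar F k cs.length), mny (kStar F k cs.length)) := by
  intro t
  induction t with
  | nil =>
    intro k hd
    have h0 : cs.length - k = 0 := by simpa using congrArg List.length hd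
    have hk : cs.length ≤ k := by omega
    rw [kStar]
    rw [if_neg (by omega)]
    simp [specLoop]
  | cons ch t' ih =>
    intro k hd
    have hklt : k < cs.length := by
      have := congrArg List.length hd
      simp at this; omega
    have hd' : cs.drop (k + 1) = t' := by
      rw [← List.tail_drop, hd]; rfl
    obtain ⟨hfx, hgy⟩ := Hstep k ch t' hd
    obtain ⟨e1, e2, e3, e4⟩ := Hmin k (by omega)
    simp only [specLoop]
    rw [← hfx, ← hgy, ← e1, ← e2, ← e3, ← e4]
    by_cases hF : F (k + 1) = true
    · have hnot : ¬ (mxx (k + 1) - mnx (k + 1) + 1 > r ∨ mxy (k + 1) - mny (k + 1) + 1 > c) := by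
        rw [HF] at hF
        simp only [Bool.and_eq_true, decide_eq_true_eq] at hF
        omega
      rw [if_neg hnot]
      rw [show kStar F k cs.length = kStar F (k + 1) cs.length from by
        rw [kStar]; rw [if_pos hklt, if_pos hF]]
      exact ih k.succ hd'
    · have hyes : (mxx (k + 1) - mnx (k + 1) + 1 > r ∨ mxy (k + 1) - mny (k + 1) + 1 > c) := by
        rw [HF] at hF
        simp only [Bool.and_eq_true, decide_eq_true_eq] at hF
        omega
      rw [if_pos hyes]
      rw [show kStar F k cs.length = k from by
        rw [kStar]; rw [if_pos hklt, if_neg hF]]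

-- characterization of the forward search
theorem kStar_prop (F : Nat → Bool) (N : Nat)
    (anti : ∀ j k, j ≤ k → k ≤ N → F k = true → F j = true) :
    ∀ (n k : Nat), N - k ≤ n → k ≤ N →
      k ≤ kStar F k N ∧ kStar F k N ≤ N ∧ (kStar F k N = k ∨ F (kStar F k N) = true) ∧
      ∀ j, kStar F k N < j → j ≤ N → F j = false := by
  intro n
  induction n with
  | zero =>
    intro k hf hk
    have : k = N := by omega
    subst this
    rw [kStar, if_neg (by omega)]
    exact ⟨le_rfl, le_rfl, Or.inl rfl, fun j h1 h2 => absurd h2 (by omega)⟩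
  | succ n ih =>
    intro k hf hk
    rw [kStar]
    by_cases hlt : k < N
    · rw [if_pos hlt]
      by_cases hF : F (k + 1) = true
      · rw [if_pos hF]
        obtain ⟨p1, p2, p3, p4⟩ := ih (k + 1) (by omega) (by omega)
        refine ⟨by omega, p2, Or.inr ?_, p4⟩
        rcases p3 with h | h
        · rw [h]; exact hF
        · exact h
      · rw [if_neg hF]
        refine ⟨le_rfl, by omega, Or.inl rfl, fun j h1 h2 => ?_⟩
        by_contra hj
        exact hF (anti (k + 1) j (by omega) h2 (by simpa using hj))
    · rw [if_neg hlt]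
      exact ⟨le_rfl, by omega, Or.inl rfl, fun j h1 h2 => absurd h2 (by omega)⟩

-- characterization of the binary search
theorem bSearch_prop (F : Nat → Bool) (N : Nat)
    (anti : ∀ j k, j ≤ k → k ≤ N → F k = true → F j = true) :
    ∀ (n lo hi : Nat), hi - lo ≤ n → lo ≤ hi → hi ≤ N →
      (∀ j, hi < j → j ≤ N → F j = false) →
      lo ≤ bSearch F lo hi ∧ bSearch F lo hi ≤ hi ∧
      (bSearch F lo hi = lo ∨ F (bSearch F lo hi) = true) ∧
      ∀ j, bSearch F lo hi < j → j ≤ N → F j = false := by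
  intro n
  induction n with
  | zero =>
    intro lo hi hf hlh hhN hup
    have : lo = hi := by omega
    subst this
    rw [bSearch, if_neg (by omega)]
    exact ⟨le_rfl, le_rfl, Or.inl rfl, hup⟩
  | succ n ih =>
    intro lo hi hf hlh hhN hup
    rw [bSearch]
    by_cases hlt : lo < hi
    · rw [if_pos hlt]
      by_cases hF : F ((lo + hi + 1) / 2) = true
      · rw [if_pos hF]
        obtain ⟨p1, p2, p3, p4⟩ := ih ((lo + hi + 1) / 2) hi (by omega) (by omega) hhN hup
        refine ⟨by omega, p2, Or.inr ?_, p4⟩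
        rcases p3 with h | h
        · rw [h]; exact hF
        · exact h
      · rw [if_neg hF]
        have hup' : ∀ j, (lo + hi + 1) / 2 - 1 < j → j ≤ N → F j = false := by
          intro j h1 h2
          by_cases hjh : j ≤ hi
          · by_contra hj
            exact hF (anti ((lo + hi + 1) / 2) j (by omega) h2 (by simpa using hj))
          · exact hup j (by omega) h2
        obtain ⟨p1, p2, p3, p4⟩ := ih lo ((lo + hi + 1) / 2 - 1) (by omega) (by omega) (by omega) hup'
        exact ⟨p1, by omega, p3, p4⟩
    · rw [if_neg hlt]
      have : lo = hi := by omega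
      subst this
      exact ⟨le_rfl, le_rfl, Or.inl rfl, hup⟩

-- both searches land on the unique index that fits with nothing fitting above it
theorem search_unique (F : Nat → Bool) (N a b : Nat)
    (ha1 : a ≤ N) (ha2 : a = 0 ∨ F a = true) (ha3 : ∀ j, a < j → j ≤ N → F j = false)
    (hb1 : b ≤ N) (hb2 : b = 0 ∨ F b = true) (hb3 : ∀ j, b < j → j ≤ N → F j = false) :
    a = b := by
  rcases Nat.lt_trichotomy a b with h | h | h
  · have hfb := ha3 b h hb1
    rcases hb2 with h0 | h0
    · omega
    · rw [h0] at hfb; exact absurd hfb (by simp)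
  · exact h
  · have hfa := hb3 a h ha1
    rcases ha2 with h0 | h0
    · omega
    · rw [h0] at hfa; exact absurd hfa (by simp)

-- ===== VERDICT (by name: the statement is the Claim_ definition above) =====
theorem solve_spec : Claim_equal_solve := by
  intro r c s _ hpre
  unfold Spec_solve solve solve_alt
  dsimp only
  have hok : ∀ ch ∈ s.toList, ch = 'U' ∨ ch = 'D' ∨ ch = 'L' ∨ ch = 'R' := by
    intro ch hch
    have := (List.all_eq_true.mp hpre) ch hch
    simpa [or_assoc] using this
  obtain ⟨hlx, hly⟩ := bWalk_len s.toList 1 1 hok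
  -- name the lists and index functions
  set w := bWalk s.toList 1 1 with hw
  set xs : List Int := 1 :: w.1 with hxs
  set ys : List Int := 1 :: w.2 with hys
  set mnxl := bRunning min xs with hmnxl
  set mxxl := bRunning max xs with hmxxl
  set mnyl := bRunning min ys with hmnyl
  set mxyl := bRunning max ys with hmxyl
  set n := s.toList.length with hn
  set F := bFits r c mnxl mxxl mnyl mxyl with hF
  have hxsl : xs.length = n + 1 := by simp [hxs, hlx]
  have hysl : ys.length = n + 1 := by simp [hys, hly]
  -- A = specLoop
  have hA := solveLoop_eq r c s.toList 1 1 1 1 1 1 hok le_rfl le_rfl le_rfl le_rfl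
    (fun _ => ⟨rfl, rfl, rfl, rfl⟩)
  -- specLoop = extrema at kStar
  have Hstep : ∀ (k : Nat) (ch : Char) (t : List Char), s.toList.drop k = ch :: t →
      xs.getD (k + 1) 0 = xs.getD k 0 + (stepOf ch).1 ∧
      ys.getD (k + 1) 0 = ys.getD k 0 + (stepOf ch).2 :=
    fun k ch t hd => bWalk_getD s.toList k 1 1 ch t hok hd
  have Hmin : ∀ k : Nat, k + 1 ≤ n →
      mnxl.getD (k + 1) 0 = min (mnxl.getD k 0) (xs.getD (k + 1) 0) ∧
      mxxl.getD (k + 1) 0 = max (mxxl.getD k 0) (xs.getD (k + 1) 0) ∧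
      mnyl.getD (k + 1) 0 = min (mnyl.getD k 0) (ys.getD (k + 1) 0) ∧
      mxyl.getD (k + 1) 0 = max (mxyl.getD k 0) (ys.getD (k + 1) 0) := by
    intro k hk
    exact ⟨bRunning_getD min xs k (by omega), bRunning_getD max xs k (by omega),
      bRunning_getD min ys k (by omega), bRunning_getD max ys k (by omega)⟩
  have hbr := bridge r c s.toList (fun k => xs.getD k 0) (fun k => ys.getD k 0)
    (fun k => mnxl.getD k 0) (fun k => mxxl.getD k 0) (fun k => mnyl.getD k 0) (fun k => mxyl.getD k 0)
    F (fun j => rfl) Hstep Hmin s.toList 0 rfl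
  -- initial values are all 1
  dsimp only at hbr
  have h0x : xs.getD 0 0 = 1 := rfl
  have h0y : ys.getD 0 0 = 1 := rfl
  have h0mnx : mnxl.getD 0 0 = 1 := by simp [hmnxl, hxs, bRunning]
  have h0mxx : mxxl.getD 0 0 = 1 := by simp [hmxxl, hxs, bRunning]
  have h0mny : mnyl.getD 0 0 = 1 := by simp [hmnyl, hys, bRunning]
  have h0mxy : mxyl.getD 0 0 = 1 := by simp [hmxyl, hys, bRunning]
  rw [h0x, h0y, h0mnx, h0mxx, h0mny, h0mxy] at hbr
  -- F is antitone
  have hFstep : ∀ k : Nat, k + 1 ≤ n → F (k + 1) = true → F k = true := by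
    intro k hk hFk
    obtain ⟨e1, e2, e3, e4⟩ := Hmin k hk
    simp only [hF, bFits, Bool.and_eq_true, decide_eq_true_eq] at hFk ⊢
    rw [e1, e2, e3, e4] at hFk
    omega
  have hanti : ∀ j k, j ≤ k → k ≤ n → F k = true → F j = true := by
    have H : ∀ (d j : Nat), j + d ≤ n → F (j + d) = true → F j = true := by
      intro d
      induction d with
      | zero => intro j _ h; simpa using h
      | succ d ihd =>
        intro j h hFd
        have step := hFstep (j + d) (by omega) (by
          have : j + (d + 1) = (j + d) + 1 := by omega
          rwa [this] at hFd)
        exact ihd j (by omega) step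
    intro j k hjk hkn hFk
    have := H (k - j) j (by omega) (by rw [show j + (k - j) = k from by omega]; exact hFk)
    exact this
  -- bSearch = kStar
  obtain ⟨q1, q2, q3, q4⟩ := kStar_prop F n hanti n 0 (by omega) (Nat.zero_le _)
  obtain ⟨p1, p2, p3, p4⟩ := bSearch_prop F n hanti n 0 n (by omega) (Nat.zero_le _) le_rfl
    (fun j h1 h2 => absurd h2 (by omega))
  have hsearch : bSearch F 0 n = kStar F 0 n := by
    apply search_unique F n _ _ p2 _ p4 q2 _ q4
    · rcases p3 with h | h
      · exact Or.inl h
      · exact Or.inr h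
    · rcases q3 with h | h
      · exact Or.inl h
      · exact Or.inr h
  -- assemble
  rw [show (PySem.Dict.ofList [("U", (1:Int)), ("D", 1), ("L", 1), ("R", 1)]) = mkPR 1 1 1 1 from rfl]
  rw [hA.1, hA.2, hbr]
  have hlen : xs.length - 1 = n := by omega
  rw [hlen, hsearch]
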